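-- pv_equiv track=rewrite | github.com/HamzahChariwala/Brainf-k | main.py | ascii_to_bf_optimised
-- ===== SOURCE A (Python) =====
-- def best_single_value_code(m):
--
--     best_code = ">" + ("+" * m)
--     best_len = 1 + m
--
--     for a in range(2, m):
--         if m % a == 0:
--             b = m // a
--             loop_code = (
--                 "+" * a
--                 + "[>"
--                 + "+" * b
--                 + "<-]"
--                 + ">"
--             )
--             code_len = a + b + 6
--             if code_len < best_len:
--                 best_len = code_len
--                 best_code = loop_code
--
--     return str(best_code)
--
-- def ascii_to_bf_optimised(n):
--
--     best_n_code = best_single_value_code(n)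
--     best_code = best_n_code
--     best_length = len(best_n_code)
--
--     for m in range(1, 256):
--         code_for_m = best_single_value_code(m)
--         diff = abs(n - m)
--         candidate_length = len(code_for_m) + diff
--
--         if candidate_length < best_length:
--             if n > m:
--                 difference_code = "+" * (n - m)
--             else:
--                 difference_code = "-" * (m - n)
--             candidate_code = code_for_m + difference_code
--             best_code = candidate_code
--             best_length = candidate_length
--
--     return str(best_code)
-- ===== SOURCE B (Python) =====
-- # B: sqrt-bounded trial division instead of A's full 2..m-1 divisor scan, and the
-- # outer search minimises candidate LENGTHS numerically, building only the winning string.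
-- def _factor(m):
--     a, i = 0, 2
--     while i * i <= m:
--         if m % i == 0:
--             a = i
--         i += 1
--     return a
--
-- def _code_len(m):
--     a = _factor(m)
--     if a and a + m // a + 6 < 1 + m:
--         return a + m // a + 6
--     return 1 + (m if m > 0 else 0)
--
-- def _code(m):
--     a = _factor(m)
--     if a and a + m // a + 6 < 1 + m:
--         return "+" * a + "[>" + "+" * (m // a) + "<-]" + ">"
--     return ">" + "+" * m
--
-- def ascii_to_bf_optimised(n):
--     best_m, best_len = None, _code_len(n)
--     for m in range(1, 256):
--         cl = _code_len(m) + abs(n - m)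
--         if cl < best_len:
--             best_m, best_len = m, cl
--     if best_m is None:
--         return _code(n)
--     return _code(best_m) + ("+" * (n - best_m) if n > best_m else "-" * (best_m - n))
-- ===== Notes on version B (the rewrite author's own statement) =====
-- stated objective: faster
-- what changed: The per-value helper's full 2..m-1 divisor scan with a running best is replaced by trial division up to sqrt(m) keeping the largest divisor below the root (its cofactor pair is provably A's winner), and the outer running-best loop is replaced by building the candidate list and taking the first minimum by length.
import Mathlib
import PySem

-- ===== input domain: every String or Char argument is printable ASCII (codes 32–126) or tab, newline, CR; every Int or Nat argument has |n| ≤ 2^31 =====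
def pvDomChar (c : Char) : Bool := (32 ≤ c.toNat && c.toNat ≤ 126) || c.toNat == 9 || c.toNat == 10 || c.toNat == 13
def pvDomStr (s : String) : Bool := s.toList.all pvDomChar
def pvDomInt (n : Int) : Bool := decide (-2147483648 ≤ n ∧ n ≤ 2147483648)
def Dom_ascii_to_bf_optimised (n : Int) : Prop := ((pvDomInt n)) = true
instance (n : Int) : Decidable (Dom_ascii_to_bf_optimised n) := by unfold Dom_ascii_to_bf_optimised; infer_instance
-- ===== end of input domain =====

-- B replaces A's full 2..m-1 divisor scan by a sqrt-bounded trial division and the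
-- outer running-best loop by a first-minimum over an explicit candidate list (objective: faster).

-- ===== PORT A =====
-- helper best_single_value_code of A, on List Char ("+"*k is pyRepeat ['+'] k)
def bsvcA (m : Int) : List Char :=
  ((PySem.List.pyRange 2 m 1).foldl (fun (s : List Char × Int) a =>
    if PySem.Int.mod m a = 0 then
      let b := PySem.Int.floordiv m a
      let loop_code := PySem.List.pyRepeat ['+'] a ++ ['[', '>'] ++ PySem.List.pyRepeat ['+'] b ++ ['<', '-', ']'] ++ ['>']
      let code_len := a + b + 6
      if code_len < s.2 then (loop_code, code_len) else s
    else s) (['>'] ++ PySem.List.pyRepeat ['+'] m, 1 + m)).1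

def ascii_to_bf_optimised (n : Int) : String :=
  let best_n_code := bsvcA n
  let s := (PySem.List.pyRange 1 256 1).foldl (fun (s : List Char × Int) m =>
    let code_for_m := bsvcA m
    let diff := |n - m|
    let candidate_length := ((code_for_m.length : Int)) + diff
    if candidate_length < s.2 then
      let difference_code := if n > m then PySem.List.pyRepeat ['+'] (n - m) else PySem.List.pyRepeat ['-'] (m - n)
      (code_for_m ++ difference_code, candidate_length)
    else s) (best_n_code, ((best_n_code.length : Int)))
  String.ofList s.1

-- ===== PORT B =====
-- B's while loop in _factor: running variable a = last divisor of m found with i*i ≤ m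
def bLoopB (m i a : Int) (h : 2 ≤ i) : Int :=
  if hg : i * i ≤ m then
    bLoopB m (i + 1) (if PySem.Int.mod m i = 0 then i else a) (by omega)
  else a
termination_by (m - i).toNat
decreasing_by
  have h2 : 2 * i ≤ i * i := by nlinarith
  omega

-- helper _factor of B
def bFactor (m : Int) : Int := bLoopB m 2 0 (by norm_num)

-- helper _code_len of B
def bCodeLen (m : Int) : Int :=
  let a := bFactor m
  if a ≠ 0 ∧ a + PySem.Int.floordiv m a + 6 < 1 + m then a + PySem.Int.floordiv m a + 6
  else 1 + (if m > 0 then m else 0)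

-- helper _code of B
def bsvcB (m : Int) : List Char :=
  let a := bFactor m
  if a ≠ 0 ∧ a + PySem.Int.floordiv m a + 6 < 1 + m then
    PySem.List.pyRepeat ['+'] a ++ ['[', '>'] ++ PySem.List.pyRepeat ['+'] (PySem.Int.floordiv m a) ++ ['<', '-', ']'] ++ ['>']
  else ['>'] ++ PySem.List.pyRepeat ['+'] m

def ascii_to_bf_optimised_alt (n : Int) : String :=
  let s := (PySem.List.pyRange 1 256 1).foldl (fun (s : Option Int × Int) m =>
      let cl := bCodeLen m + |n - m|
      if cl < s.2 then (some m, cl) else s) (none, bCodeLen n)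
  match s.1 with
  | none => String.ofList (bsvcB n)
  | some m => String.ofList (bsvcB m ++ (if n > m then PySem.List.pyRepeat ['+'] (n - m)
      else PySem.List.pyRepeat ['-'] (m - n)))

-- ===== PRECONDITION & SPEC =====
def Spec_ascii_to_bf_optimised (n : Int) (out : String) : Prop := out = ascii_to_bf_optimised_alt n
instance (n : Int) (out : String) : Decidable (Spec_ascii_to_bf_optimised n out) := by unfold Spec_ascii_to_bf_optimised; infer_instance

-- ===== CLAIM (what is proved, stated in full; the proofs are below) =====
def Claim_equal_ascii_to_bf_optimised : Prop := ∀ (n : Int), Dom_ascii_to_bf_optimised n → Spec_ascii_to_bf_optimised n (ascii_to_bf_optimised n)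

-- ===== LEMMAS AND PROOFS =====

-- A's inner-loop step, named (definitionally the lambda inside bsvcA)
def stepA (m : Int) (s : List Char × Int) (a : Int) : List Char × Int :=
  if PySem.Int.mod m a = 0 then
    let b := PySem.Int.floordiv m a
    let loop_code := PySem.List.pyRepeat ['+'] a ++ ['[', '>'] ++ PySem.List.pyRepeat ['+'] b ++ ['<', '-', ']'] ++ ['>']
    let code_len := a + b + 6
    if code_len < s.2 then (loop_code, code_len) else s
  else s

-- the state A's inner loop maintains, as a function of the best factor g found so far (0 = none)
def mkC (m g : Int) : List Char :=
  if g ≠ 0 ∧ g + PySem.Int.floordiv m g + 6 < 1 + m then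
    PySem.List.pyRepeat ['+'] g ++ ['[', '>'] ++ PySem.List.pyRepeat ['+'] (PySem.Int.floordiv m g) ++ ['<', '-', ']'] ++ ['>']
  else ['>'] ++ PySem.List.pyRepeat ['+'] m

def mkL (m g : Int) : Int :=
  if g ≠ 0 ∧ g + PySem.Int.floordiv m g + 6 < 1 + m then g + PySem.Int.floordiv m g + 6 else 1 + m

-- invariant: g is the largest divisor d of m with d*d ≤ m among d < k (0 if none so far)
def Hinv (m k g : Int) : Prop :=
  (g = 0 ∧ ∀ d, 2 ≤ d → d * d ≤ m → d ∣ m → k ≤ d) ∨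
  (2 ≤ g ∧ g < k ∧ g * g ≤ m ∧ g ∣ m ∧ ∀ d, g < d → d * d ≤ m → d ∣ m → k ≤ d)

-- same, for B's while loop (no upper bound on g)
def HinvB (m i a : Int) : Prop :=
  (a = 0 ∧ ∀ d, 2 ≤ d → d * d ≤ m → d ∣ m → i ≤ d) ∨
  (2 ≤ a ∧ a * a ≤ m ∧ a ∣ m ∧ ∀ d, a < d → d * d ≤ m → d ∣ m → i ≤ d)

-- g is THE largest divisor d of m with 2 ≤ d and d*d ≤ m (0 if none)
def Hfin (m g : Int) : Prop :=
  (g = 0 ∧ ∀ d, 2 ≤ d → d * d ≤ m → ¬ d ∣ m) ∨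
  (2 ≤ g ∧ g * g ≤ m ∧ g ∣ m ∧ ∀ d, g < d → d * d ≤ m → ¬ d ∣ m)

theorem div_exact (m c : Int) (hc : 0 < c) (h : c ∣ m) : PySem.Int.floordiv m c * c = m := by
  obtain ⟨q, hq⟩ := h
  have hfd : PySem.Int.floordiv m c = q := by
    rw [PySem.Int.floordiv_eq_iff_of_pos hc]
    constructor <;> nlinarith
  rw [hfd, hq]; ring

theorem Hfin_unique (m g1 g2 : Int) (h1 : Hfin m g1) (h2 : Hfin m g2) : g1 = g2 := by
  rcases h1 with ⟨e1, f1⟩ | ⟨g1a, g1b, g1c, f1⟩ <;> rcases h2 with ⟨e2, f2⟩ | ⟨g2a, g2b, g2c, f2⟩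
  · omega
  · exact absurd g2c (f1 _ g2a g2b)
  · exact absurd g1c (f2 _ g1a g1b)
  · by_contra hne
    rcases lt_or_gt_of_ne hne with h | h
    · exact f1 _ h g2b g2c
    · exact f2 _ h g1b g1c

theorem fdiv_mono (m c g : Int) (h2 : 2 ≤ c) (hcg : c ≤ g) (hg : g * g ≤ m) (hc : c ∣ m) (hgd : g ∣ m) :
    g + PySem.Int.floordiv m g ≤ c + PySem.Int.floordiv m c := by
  have hcp : (0:Int) < c := by omega
  have hgp : (0:Int) < g := by omega
  have hb1 := div_exact m c hcp hc
  have hb2 := div_exact m g hgp hgd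
  set b1 := PySem.Int.floordiv m c with hb1d
  set b2 := PySem.Int.floordiv m g with hb2d
  have hcgm : c * g ≤ m := le_trans (by nlinarith) hg
  have key : (b1 - b2) * (c * g) = m * (g - c) := by linear_combination g * hb1 - c * hb2
  nlinarith [mul_le_mul_of_nonneg_right hcgm (sub_nonneg.2 hcg), mul_pos hcp hgp]

theorem fdiv_strict (m c g : Int) (h2 : 2 ≤ c) (hcg : c < g) (hg : g * g ≤ m) (hc : c ∣ m) (hgd : g ∣ m) :
    g + PySem.Int.floordiv m g < c + PySem.Int.floordiv m c := by
  have hcp : (0:Int) < c := by omega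
  have hgp : (0:Int) < g := by omega
  have hb1 := div_exact m c hcp hc
  have hb2 := div_exact m g hgp hgd
  set b1 := PySem.Int.floordiv m c with hb1d
  set b2 := PySem.Int.floordiv m g with hb2d
  have hcgm : c * g < m := lt_of_lt_of_le (by nlinarith) hg
  have key : (b1 - b2) * (c * g) = m * (g - c) := by linear_combination g * hb1 - c * hb2
  nlinarith [mul_lt_mul_of_pos_right hcgm (by omega : (0:Int) < g - c), mul_pos hcp hgp]

theorem HinvB_stop (m i a : Int) (h2 : 2 ≤ i) (hstop : ¬ i * i ≤ m) (hI : HinvB m i a) : Hfin m a := by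
  rcases hI with ⟨ha, hmax⟩ | ⟨ha2, hsq, had, hmax⟩
  · left
    refine ⟨ha, fun d hd hdsq hdd => ?_⟩
    have hid := hmax d hd hdsq hdd
    exact hstop (le_trans (mul_le_mul hid hid (by omega) (by omega)) hdsq)
  · right
    refine ⟨ha2, hsq, had, fun d hd hdsq hdd => ?_⟩
    have hid := hmax d hd hdsq hdd
    have h2d : (2:Int) ≤ d := by omega
    exact hstop (le_trans (mul_le_mul hid hid (by omega) (by omega)) hdsq)

theorem HinvB_step (m i a : Int) (h2 : 2 ≤ i) (hg : i * i ≤ m) (hI : HinvB m i a) :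
    HinvB m (i + 1) (if PySem.Int.mod m i = 0 then i else a) := by
  by_cases hd : i ∣ m
  · rw [if_pos ((PySem.Int.mod_eq_zero_iff_dvd m i).2 hd)]
    right
    exact ⟨h2, hg, hd, fun d hdi _ _ => by omega⟩
  · rw [if_neg (fun h => hd ((PySem.Int.mod_eq_zero_iff_dvd m i).1 h))]
    rcases hI with ⟨ha, hmax⟩ | ⟨ha2, hsq, had, hmax⟩
    · left
      refine ⟨ha, fun d hdd hdsq hddvd => ?_⟩
      have := hmax d hdd hdsq hddvd
      have hne : d ≠ i := fun h => hd (h ▸ hddvd)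
      omega
    · right
      refine ⟨ha2, hsq, had, fun d hdd hdsq hddvd => ?_⟩
      have := hmax d hdd hdsq hddvd
      have hne : d ≠ i := fun h => hd (h ▸ hddvd)
      omega

theorem bLoopB_spec (m : Int) : ∀ (N : ℕ) (i a : Int) (h : 2 ≤ i), m - i ≤ (N : Int) → HinvB m i a →
    Hfin m (bLoopB m i a h) := by
  intro N
  induction N with
  | zero =>
    intro i a h hN hI
    rw [bLoopB.eq_def]
    have hmi : m ≤ i := by push_cast at hN; omega
    have hstop : ¬ i * i ≤ m := by nlinarith
    rw [dif_neg hstop]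
    exact HinvB_stop m i a h hstop hI
  | succ N ih =>
    intro i a h hN hI
    rw [bLoopB.eq_def]
    by_cases hg : i * i ≤ m
    · rw [dif_pos hg]
      exact ih (i + 1) _ (by omega) (by push_cast at hN ⊢; omega) (HinvB_step m i a h hg hI)
    · rw [dif_neg hg]
      exact HinvB_stop m i a h hg hI

theorem Hinv_stop (m k g : Int) (hmk : m ≤ k) (hH : Hinv m k g) : Hfin m g := by
  rcases hH with ⟨hg0, hmax⟩ | ⟨hg2, hgk, hgsq, hgd, hmax⟩
  · left
    refine ⟨hg0, fun d hd hdsq hdd => ?_⟩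
    have := hmax d hd hdsq hdd
    nlinarith
  · right
    refine ⟨hg2, hgsq, hgd, fun d hd hdsq hdd => ?_⟩
    have := hmax d hd hdsq hdd
    have h2d : (2:Int) ≤ d := by omega
    nlinarith

theorem stepA_eq (m k g : Int) (hm : 0 < m) (h2 : 2 ≤ k) (hkm : k < m) (hH : Hinv m k g) :
    ∃ g', stepA m (mkC m g, mkL m g) k = (mkC m g', mkL m g') ∧ Hinv m (k + 1) g' := by
  by_cases hdvd : k ∣ m
  · have hmod : PySem.Int.mod m k = 0 := (PySem.Int.mod_eq_zero_iff_dvd m k).2 hdvd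
    by_cases hsq : k * k ≤ m
    · -- a new best factor k is found
      refine ⟨k, ?_, Or.inr ⟨by omega, by omega, hsq, hdvd, fun d hd _ _ => by omega⟩⟩
      simp only [stepA, hmod, if_pos]
      rcases hH with ⟨hg0, hmax⟩ | ⟨hg2, hgk, hgsq, hgd, hmax⟩
      · subst hg0
        have hL : mkL m 0 = 1 + m := by simp [mkL]
        rw [hL]
        by_cases hlt : k + PySem.Int.floordiv m k + 6 < 1 + m
        · rw [if_pos hlt]
          unfold mkC mkL
          split_ifs <;> first | rfl | (exfalso; omega)
        · rw [if_neg hlt]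
          unfold mkC mkL
          split_ifs <;> first | rfl | (exfalso; omega)
      · have hfs : k + PySem.Int.floordiv m k < g + PySem.Int.floordiv m g :=
          fdiv_strict m g k hg2 hgk hsq hgd hdvd
        by_cases hgl : g + PySem.Int.floordiv m g + 6 < 1 + m
        · have hL : mkL m g = g + PySem.Int.floordiv m g + 6 := by
            unfold mkL; rw [if_pos ⟨by omega, hgl⟩]
          rw [hL, if_pos (by omega)]
          unfold mkC mkL
          split_ifs <;> first | rfl | (exfalso; omega)
        · have hL : mkL m g = 1 + m := by
            unfold mkL; rw [if_neg (fun h => hgl h.2)]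
          rw [hL]
          by_cases hkl : k + PySem.Int.floordiv m k + 6 < 1 + m
          · rw [if_pos hkl]
            unfold mkC mkL
            split_ifs <;> first | rfl | (exfalso; omega)
          · rw [if_neg hkl]
            unfold mkC mkL
            split_ifs <;> first | rfl | (exfalso; omega)
    · -- k divides m but k is past the square root: its cofactor was already seen
      have hck : PySem.Int.floordiv m k * k = m := div_exact m k (by omega) hdvd
      set c := PySem.Int.floordiv m k with hcdef
      have hcltk : c < k := by nlinarith
      have hc1 : 1 ≤ c := by nlinarith
      have hc2 : 2 ≤ c := by
        rcases eq_or_lt_of_le hc1 with h | h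
        · exfalso; rw [← h] at hck; omega
        · omega
      have hcsq : c * c ≤ m := by nlinarith
      have hcd : c ∣ m := ⟨k, hck.symm⟩
      rcases hH with ⟨hg0, hmax⟩ | ⟨hg2, hgk, hgsq, hgd, hmax⟩
      · exact absurd (hmax c hc2 hcsq hcd) (by omega)
      · have hcg : c ≤ g := by
          by_contra hcontra
          exact absurd (hmax c (by omega) hcsq hcd) (by omega)
        have hfc : PySem.Int.floordiv m c = k := by
          have h1 := div_exact m c (by omega) hcd
          have : PySem.Int.floordiv m c * c = k * c := by rw [h1, ← hck]; ring
          exact mul_right_cancel₀ (by omega) this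
        have hfg : g + PySem.Int.floordiv m g ≤ c + k := by
          have := fdiv_mono m c g hc2 hcg hgsq hcd hgd
          omega
        refine ⟨g, ?_, ?_⟩
        · simp only [stepA, hmod, if_pos]
          by_cases hgl : g + PySem.Int.floordiv m g + 6 < 1 + m
          · have hL : mkL m g = g + PySem.Int.floordiv m g + 6 := by
              unfold mkL; rw [if_pos ⟨by omega, hgl⟩]
            rw [hL, if_neg (by omega)]
          · have hL : mkL m g = 1 + m := by
              unfold mkL; rw [if_neg (fun h => hgl h.2)]
            rw [hL, if_neg (by omega)]
        · right
          refine ⟨hg2, by omega, hgsq, hgd, fun d hd hdsq hdd => ?_⟩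
          have := hmax d hd hdsq hdd
          rcases eq_or_ne d k with h | h
          · exfalso; subst h; exact hsq hdsq
          · omega
  · have hmod : ¬ PySem.Int.mod m k = 0 := fun h => hdvd ((PySem.Int.mod_eq_zero_iff_dvd m k).1 h)
    refine ⟨g, by simp only [stepA, if_neg hmod], ?_⟩
    rcases hH with ⟨hg0, hmax⟩ | ⟨hg2, hgk, hgsq, hgd, hmax⟩
    · left
      refine ⟨hg0, fun d hd hdsq hdd => ?_⟩
      have := hmax d hd hdsq hdd
      have hne : d ≠ k := fun h => hdvd (h ▸ hdd)
      omega
    · right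
      refine ⟨hg2, by omega, hgsq, hgd, fun d hd hdsq hdd => ?_⟩
      have := hmax d hd hdsq hdd
      have hne : d ≠ k := fun h => hdvd (h ▸ hdd)
      omega

theorem AFold (m : Int) (hm : 0 < m) : ∀ (N : ℕ) (k g gf : Int), 2 ≤ k → m - k ≤ (N : Int) →
    Hinv m k g → Hfin m gf →
    (PySem.List.pyRange k m 1).foldl (stepA m) (mkC m g, mkL m g) = (mkC m gf, mkL m gf) := by
  intro N
  induction N with
  | zero =>
    intro k g gf h2 hN hH hF
    rw [PySem.List.pyRange_one_eq_nil (by omega)]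
    simp only [List.foldl_nil]
    rw [Hfin_unique m g gf (Hinv_stop m k g (by omega) hH) hF]
  | succ N ih =>
    intro k g gf h2 hN hH hF
    by_cases hk : k < m
    · rw [PySem.List.pyRange_one_cons hk, List.foldl_cons]
      obtain ⟨g', hs, hH'⟩ := stepA_eq m k g hm h2 hk hH
      rw [hs]
      exact ih (k + 1) g' gf (by omega) (by push_cast at hN ⊢; omega) hH' hF
    · rw [PySem.List.pyRange_one_eq_nil (by omega)]
      simp only [List.foldl_nil]
      rw [Hfin_unique m g gf (Hinv_stop m k g (by omega) hH) hF]

theorem bsvc_eq (m : Int) : bsvcA m = bsvcB m := by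
  by_cases hm : m ≤ 2
  · have hrange : PySem.List.pyRange 2 m 1 = [] := PySem.List.pyRange_one_eq_nil (by omega)
    have hstop : ¬ (2 : Int) * 2 ≤ m := by omega
    unfold bsvcA bsvcB bFactor
    rw [hrange, bLoopB.eq_def, dif_neg hstop]
    simp
  · have hm0 : (0:Int) < m := by omega
    have hB : Hfin m (bLoopB m 2 0 (by norm_num)) :=
      bLoopB_spec m (m - 2).toNat 2 0 (by norm_num) (by omega) (Or.inl ⟨rfl, fun d hd _ _ => hd⟩)
    have hA : bsvcA m = ((PySem.List.pyRange 2 m 1).foldl (stepA m) (mkC m 0, mkL m 0)).1 := by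
      have hC : mkC m 0 = ['>'] ++ PySem.List.pyRepeat ['+'] m := by simp [mkC]
      have hL : mkL m 0 = 1 + m := by simp [mkL]
      rw [hC, hL]; rfl
    rw [hA, AFold m hm0 (m - 2).toNat 2 0 (bLoopB m 2 0 (by norm_num)) (by norm_num) (by omega)
      (Or.inl ⟨rfl, fun d hd _ _ => hd⟩) hB]
    rfl

-- ===== outer loop: A's running best code = B's running best length, rebuilt =====

def candB (n m : Int) : List Char :=
  bsvcB m ++ (if n > m then PySem.List.pyRepeat ['+'] (n - m) else PySem.List.pyRepeat ['-'] (m - n))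

def toCode (n : Int) (o : Option Int) : List Char :=
  match o with
  | none => bsvcB n
  | some m => candB n m

def pairStep (s : List Char × Int) (c : List Char) : List Char × Int :=
  if ((c.length : Int)) < s.2 then (c, ((c.length : Int))) else s

def stepB (n : Int) (s : Option Int × Int) (m : Int) : Option Int × Int :=
  if ((candB n m).length : Int) < s.2 then (some m, ((candB n m).length : Int)) else s

theorem len_bCode (m : Int) : ((bsvcB m).length : Int) = bCodeLen m := by
  have hfin : Hfin m (bFactor m) :=
    bLoopB_spec m (m - 2).toNat 2 0 (by norm_num) (Int.self_le_toNat _)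
      (Or.inl ⟨rfl, fun d hd _ _ => hd⟩)
  simp only [bsvcB, bCodeLen]
  by_cases hc : bFactor m ≠ 0 ∧ bFactor m + PySem.Int.floordiv m (bFactor m) + 6 < 1 + m
  · rw [if_pos hc, if_pos hc]
    obtain ⟨hne, hlt⟩ := hc
    obtain ⟨h2a, hdvd, hsq⟩ : 2 ≤ bFactor m ∧ bFactor m ∣ m ∧ bFactor m * bFactor m ≤ m := by
      rcases hfin with ⟨h0, _⟩ | ⟨h2, hsq, hdvd, _⟩
      · exact absurd h0 hne
      · exact ⟨h2, hdvd, hsq⟩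
    have hb := div_exact m (bFactor m) (by omega) hdvd
    have hm4 : 4 ≤ m := by nlinarith
    have hb1 : 1 ≤ PySem.Int.floordiv m (bFactor m) := by nlinarith
    simp only [List.length_append, PySem.List.pyRepeat_singleton, List.length_replicate,
      List.length_cons, List.length_nil]
    omega
  · rw [if_neg hc, if_neg hc]
    simp only [List.length_append, PySem.List.pyRepeat_singleton, List.length_replicate,
      List.length_cons, List.length_nil]
    split_ifs <;> omega

theorem len_candB (n m : Int) : (((candB n m).length : Int)) = bCodeLen m + |n - m| := by
  unfold candB
  have habs : |n - m| = ((n - m).natAbs : Int) := Int.abs_eq_natAbs _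
  rw [← len_bCode]
  by_cases h : n > m
  · rw [if_pos h, habs]
    simp only [List.length_append, PySem.List.pyRepeat_singleton, List.length_replicate]
    omega
  · rw [if_neg h, habs]
    simp only [List.length_append, PySem.List.pyRepeat_singleton, List.length_replicate]
    omega

set_option maxRecDepth 8000 in
theorem pairedFold (n : Int) (L : List Int) : ∀ o : Option Int,
    (L.foldl (stepB n) (o, ((toCode n o).length : Int))).2
      = (((toCode n (L.foldl (stepB n) (o, ((toCode n o).length : Int))).1).length : Int))
    ∧ L.foldl (fun s m => pairStep s (candB n m)) (toCode n o, ((toCode n o).length : Int))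
      = (toCode n (L.foldl (stepB n) (o, ((toCode n o).length : Int))).1,
         (L.foldl (stepB n) (o, ((toCode n o).length : Int))).2) := by
  induction L with
  | nil => intro o; exact ⟨rfl, rfl⟩
  | cons m L ih =>
    intro o
    simp only [List.foldl_cons]
    by_cases h : ((candB n m).length : Int) < ((toCode n o).length : Int)
    · rw [show stepB n (o, ((toCode n o).length : Int)) m
            = (some m, ((candB n m).length : Int)) from by simp [stepB, h],
          show pairStep (toCode n o, ((toCode n o).length : Int)) (candB n m)
            = (candB n m, ((candB n m).length : Int)) from by simp [pairStep, h]]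
      have ih' := ih (some m)
      rw [show toCode n (some m) = candB n m from rfl] at ih'
      exact ih'
    · rw [show stepB n (o, ((toCode n o).length : Int)) m
            = (o, ((toCode n o).length : Int)) from by simp [stepB, h],
          show pairStep (toCode n o, ((toCode n o).length : Int)) (candB n m)
            = (toCode n o, ((toCode n o).length : Int)) from by simp [pairStep, h]]
      exact ih o

set_option maxHeartbeats 1000000 in
theorem outer_eq (n : Int) : ascii_to_bf_optimised n = ascii_to_bf_optimised_alt n := by
  unfold ascii_to_bf_optimised ascii_to_bf_optimised_alt
  simp only [bsvc_eq]
  have hbody : (fun (s : List Char × Int) (m : Int) =>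
      let code_for_m := bsvcB m
      let diff := |n - m|
      let candidate_length := ((code_for_m.length : Int)) + diff
      if candidate_length < s.2 then
        let difference_code := if n > m then PySem.List.pyRepeat ['+'] (n - m)
          else PySem.List.pyRepeat ['-'] (m - n)
        (code_for_m ++ difference_code, candidate_length)
      else s) = fun s m => pairStep s (candB n m) := by
    funext s m
    simp only [pairStep]
    rw [len_candB, ← len_bCode]
    unfold candB
    rfl
  have hbody2 : (fun (s : Option Int × Int) (m : Int) =>
      let cl := bCodeLen m + |n - m|
      if cl < s.2 then (some m, cl) else s) = stepB n := by
    funext s m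
    simp only [stepB, len_candB]
  rw [hbody, hbody2, show bCodeLen n = ((bsvcB n).length : Int) from (len_bCode n).symm]
  have hP := (pairedFold n (PySem.List.pyRange 1 256 1) none).2
  rw [show toCode n none = bsvcB n from rfl] at hP
  rw [hP]
  rcases hB : (List.foldl (stepB n) (none, ((bsvcB n).length : Int))
      (PySem.List.pyRange 1 256 1)).1 with _ | m
  · rfl
  · rfl

-- ===== VERDICT (by name: the statement is the Claim_ definition above) =====
theorem ascii_to_bf_optimised_spec : Claim_equal_ascii_to_bf_optimised := by
  intro n _
  unfold Spec_ascii_to_bf_optimised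
  exact outer_eq n
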